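-- pv_equiv track=rewrite | github.com/sanial2001/graph | gcd hacka.py | solve
-- ===== SOURCE A (Python) =====
-- import math
--
-- def solve(n, nums, q, queries):
--     ans = []
--     for q in queries:
--         res = 0
--         for i in range(n - 1):
--             for j in range(i + 1, n):
--                 x = math.gcd(nums[i], nums[j])
--                 if x % q == 0:
--                     res += 1
--         ans.append(res)
--     return ans
-- ===== SOURCE B (Python) =====
-- def solve(n, nums, q, queries):
--     # q | gcd(a, b) iff q | a and q | b, so the answer per query is C(k, 2)
--     # where k counts the elements divisible by the query.
--     ans = []
--     for qr in queries:
--         if n < 2: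
--             ans.append(0)
--             continue
--         k = 0
--         for i in range(n):
--             if nums[i] % qr == 0:
--                 k += 1
--         ans.append(k * (k - 1) // 2)
--     return ans
-- ===== Notes on version B (the rewrite author's own statement) =====
-- stated objective: faster
-- what changed: Replaced the per-query O(n^2) scan over all pairs computing gcds with a single O(n) count k of elements divisible by the query (q | gcd(a,b) iff q | a and q | b), returning k*(k-1)//2.
import Mathlib
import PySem

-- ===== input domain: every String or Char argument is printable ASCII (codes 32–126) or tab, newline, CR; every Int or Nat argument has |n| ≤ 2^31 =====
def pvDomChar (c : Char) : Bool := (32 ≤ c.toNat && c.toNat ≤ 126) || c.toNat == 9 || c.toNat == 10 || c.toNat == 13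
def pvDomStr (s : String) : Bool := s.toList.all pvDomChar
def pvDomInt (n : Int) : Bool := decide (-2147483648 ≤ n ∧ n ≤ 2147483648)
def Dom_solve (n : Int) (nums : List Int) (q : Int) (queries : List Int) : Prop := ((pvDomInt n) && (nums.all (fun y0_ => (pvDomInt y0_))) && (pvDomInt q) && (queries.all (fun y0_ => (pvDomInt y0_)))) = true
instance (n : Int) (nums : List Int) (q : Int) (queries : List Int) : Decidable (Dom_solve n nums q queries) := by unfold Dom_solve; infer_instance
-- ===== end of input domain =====

-- B replaces the O(n^2) pairwise-gcd scan per query by one O(n) count k of elements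
-- divisible by the query (q | gcd(a,b) iff q | a and q | b) and returns k*(k-1)//2.

-- ===== PORT A =====
def solve (n : Int) (nums : List Int) (q : Int) (queries : List Int) : List Int :=
  queries.foldl (fun ans qr =>
    let res : Int := (PySem.List.pyRange 0 (n - 1)).foldl (fun res i =>
      (PySem.List.pyRange (i + 1) n).foldl (fun res j =>
        let x : Int := (Int.gcd (PySem.List.pyGetD nums i 0) (PySem.List.pyGetD nums j 0) : Nat)
        if PySem.Int.mod x qr = 0 then res + 1 else res) res) 0
    ans ++ [res]) []

-- ===== PORT B =====
def solve_alt (n : Int) (nums : List Int) (q : Int) (queries : List Int) : List Int :=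
  queries.foldl (fun ans qr =>
    if n < 2 then ans ++ [(0 : Int)]
    else
      let k : Int := (PySem.List.pyRange 0 n).foldl (fun k i =>
        if PySem.Int.mod (PySem.List.pyGetD nums i 0) qr = 0 then k + 1 else k) 0
      ans ++ [PySem.Int.floordiv (k * (k - 1)) 2]) []

-- ===== PRECONDITION & SPEC =====
-- Pre_ excludes exactly the inputs where the Python A raises: with at least one query and
-- n ≥ 2, A raises IndexError if n > len(nums) and ZeroDivisionError if some query is 0.
def Pre_solve (n : Int) (nums : List Int) (q : Int) (queries : List Int) : Prop :=
  queries = [] ∨ n < 2 ∨ (n ≤ (nums.length : Int) ∧ (0 : Int) ∉ queries)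
instance (n : Int) (nums : List Int) (q : Int) (queries : List Int) : Decidable (Pre_solve n nums q queries) := by unfold Pre_solve; infer_instance

def pvWitness_solve : Int × List Int × Int × List Int := (3, [2, 4, 6], 1, [2])

def Spec_solve (n : Int) (nums : List Int) (q : Int) (queries : List Int) (out : List Int) : Prop := out = solve_alt n nums q queries
instance (n : Int) (nums : List Int) (q : Int) (queries : List Int) (out : List Int) : Decidable (Spec_solve n nums q queries out) := by unfold Spec_solve; infer_instance

-- ===== CLAIM (what is proved, stated in full; the proofs are below) =====
def Claim_equal_solve : Prop := ∀ (n : Int) (nums : List Int) (q : Int) (queries : List Int), Dom_solve n nums q queries → Pre_solve n nums q queries → Spec_solve n nums q queries (solve n nums q queries)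

-- ===== LEMMAS AND PROOFS =====

-- pair counter: pcN P l = number of index pairs i < j of l with P l[i] and P l[j]
def pcN (P : Int → Bool) : List Int → Nat
  | [] => 0
  | x :: s => (if P x then s.countP P else 0) + pcN P s

lemma pcN_of_length_le_one (P : Int → Bool) (l : List Int) (h : l.length ≤ 1) : pcN P l = 0 := by
  match l, h with
  | [], _ => rfl
  | [x], _ => simp [pcN]

lemma pcN_eq_choose (P : Int → Bool) (l : List Int) : pcN P l = (l.countP P).choose 2 := by
  induction l with
  | nil => rfl
  | cons x s ih =>
    by_cases h : P x = true <;>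
      simp [pcN, h, List.countP_cons, ih, Nat.choose_succ_succ, Nat.choose_one_right, Nat.add_comm]

lemma foldl_ite_count {α : Type} (Q : α → Prop) [DecidablePred Q] (l : List α) (r : Int) :
    l.foldl (fun acc x => if Q x then acc + 1 else acc) r
      = r + (l.countP (fun x => decide (Q x)) : Int) := by
  induction l generalizing r with
  | nil => simp
  | cons x t ih =>
    by_cases h : Q x <;> simp [List.countP_cons, h, ih] <;> push_cast <;> ring

lemma dvd_gcd_iff_int (d a b : Int) : d ∣ (Int.gcd a b : Nat) ↔ d ∣ a ∧ d ∣ b := by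
  constructor
  · intro h
    exact ⟨h.trans (Int.gcd_dvd_left a b), h.trans (Int.gcd_dvd_right a b)⟩
  · rintro ⟨h1, h2⟩
    rw [← Int.natAbs_dvd] at h1 h2 ⊢
    exact_mod_cast Int.natCast_dvd_natCast.mpr (Int.dvd_gcd h1 h2)

lemma getD_take_eq (nums : List Int) (n j : Int) (hj0 : 0 ≤ j) (hjn : j < n)
    (hlen : n ≤ (nums.length : Int)) :
    PySem.List.pyGetD nums j 0 = PySem.List.pyGetD (nums.take n.toNat) j 0 := by
  have hjlen : j.toNat < nums.length := by omega
  have hjt : j.toNat < (nums.take n.toNat).length := by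
    simp [List.length_take]; omega
  rw [PySem.List.pyGetD_of_nonneg _ _ hj0, PySem.List.pyGetD_of_nonneg _ _ hj0,
    List.getD_eq_getElem _ _ hjlen, List.getD_eq_getElem _ _ hjt, List.getElem_take]

lemma map_range_getD (nums : List Int) (n a : Int)
    (ha : 0 ≤ a) (h0 : 0 ≤ n) (hlen : n ≤ (nums.length : Int)) :
    (PySem.List.pyRange a n).map (fun j => PySem.List.pyGetD nums j 0)
      = (nums.take n.toNat).drop a.toNat := by
  have hmem : ∀ j ∈ PySem.List.pyRange a n,
      PySem.List.pyGetD nums j 0 = PySem.List.pyGetD (nums.take n.toNat) j 0 := by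
    intro j hj
    rw [PySem.List.mem_pyRange_one] at hj
    exact getD_take_eq nums n j (le_trans ha hj.1) hj.2 hlen
  rw [List.map_congr_left hmem]
  have hlt : PySem.List.len (nums.take n.toNat) = n := by
    rw [PySem.List.len_eq]; simp [List.length_take]; omega
  rw [show PySem.List.pyRange a n = PySem.List.pyRange a (PySem.List.len (nums.take n.toNat)) by
        rw [hlt]]
  exact PySem.List.map_pyGetD_pyRange (nums.take n.toNat) 0 ha

lemma countP_range_getD (nums : List Int) (P : Int → Bool) (n a : Int)
    (ha : 0 ≤ a) (h0 : 0 ≤ n) (hlen : n ≤ (nums.length : Int)) :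
    (PySem.List.pyRange a n).countP (fun j => P (PySem.List.pyGetD nums j 0))
      = ((nums.take n.toNat).drop a.toNat).countP P := by
  rw [← map_range_getD nums n a ha h0 hlen, List.countP_map]
  rfl

lemma choose_two_int (c : Nat) :
    PySem.Int.floordiv ((c : Int) * ((c : Int) - 1)) 2 = (c.choose 2 : Int) := by
  cases c with
  | zero => simp [PySem.Int.floordiv]
  | succ d =>
    have hdvd : (d + 1).choose 2 * 2 = (d + 1) * d := by
      rw [Nat.choose_two_right]
      have he : 2 ∣ (d + 1) * d := by
        rcases Nat.even_mul_succ_self d with ⟨k, hk⟩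
        exact ⟨k, by rw [Nat.mul_comm]; omega⟩
      simpa using Nat.div_mul_cancel he
    have hcast : ((d + 1 : Nat) : Int) * (((d + 1 : Nat) : Int) - 1)
        = (((d + 1).choose 2 : Nat) : Int) * 2 := by
      push_cast [hdvd]
      push_cast at hdvd ⊢
      nlinarith [hdvd]
    rw [hcast, PySem.Int.floordiv_eq_ediv_of_pos (by norm_num : (0:Int) < 2),
      Int.mul_ediv_cancel _ (by norm_num)]

-- A's inner loop over j counts, at fixed i, the j with qr | gcd(nums[i], nums[j])
lemma inner_fold (nums : List Int) (qr n i : Int) (r : Int) (hi : 0 ≤ i) (hin : i < n)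
    (hlen : n ≤ (nums.length : Int)) :
    (PySem.List.pyRange (i + 1) n).foldl (fun res j =>
        let x : Int := (Int.gcd (PySem.List.pyGetD nums i 0) (PySem.List.pyGetD nums j 0) : Nat)
        if PySem.Int.mod x qr = 0 then res + 1 else res) r
      = r + (if qr ∣ PySem.List.pyGetD nums i 0 then
              ((((nums.take n.toNat).drop (i.toNat + 1)).countP (fun v => decide (qr ∣ v)) : Nat) : Int)
            else 0) := by
  simp only [PySem.Int.mod_eq_zero_iff_dvd]
  rw [foldl_ite_count]
  by_cases hP : qr ∣ PySem.List.pyGetD nums i 0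
  · rw [if_pos hP]
    congr 1
    have hc : (PySem.List.pyRange (i + 1) n).countP
          (fun j => decide (qr ∣ ((Int.gcd (PySem.List.pyGetD nums i 0) (PySem.List.pyGetD nums j 0) : Nat) : Int)))
        = (PySem.List.pyRange (i + 1) n).countP
          (fun j => decide (qr ∣ PySem.List.pyGetD nums j 0)) := by
      refine List.countP_congr fun j _ => ?_
      simp [dvd_gcd_iff_int, hP]
    rw [hc, countP_range_getD nums (fun v => decide (qr ∣ v)) n (i + 1) (by omega) (by omega) hlen]
    have : (i + 1).toNat = i.toNat + 1 := by omega
    rw [this]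
  · rw [if_neg hP]
    have hz : (PySem.List.pyRange (i + 1) n).countP
          (fun j => decide (qr ∣ ((Int.gcd (PySem.List.pyGetD nums i 0) (PySem.List.pyGetD nums j 0) : Nat) : Int))) = 0 := by
      refine List.countP_eq_zero.2 fun j _ => ?_
      simp [dvd_gcd_iff_int, hP]
    rw [hz]
    simp

-- A's outer loop accumulates the pair count pcN of the still-unseen suffix
lemma outer_fold (nums : List Int) (qr n : Int) (hlen : n ≤ (nums.length : Int)) (h2 : 2 ≤ n) :
    ∀ (m : Nat) (a r : Int), 0 ≤ a → n - 1 - a ≤ (m : Int) →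
    (PySem.List.pyRange a (n - 1)).foldl (fun res i =>
        (PySem.List.pyRange (i + 1) n).foldl (fun res j =>
          let x : Int := (Int.gcd (PySem.List.pyGetD nums i 0) (PySem.List.pyGetD nums j 0) : Nat)
          if PySem.Int.mod x qr = 0 then res + 1 else res) res) r
      = r + ((pcN (fun v => decide (qr ∣ v)) ((nums.take n.toNat).drop a.toNat) : Nat) : Int) := by
  have hlt : (nums.take n.toNat).length = n.toNat := by
    simp [List.length_take]; omega
  intro m
  induction m with
  | zero =>
    intro a r ha hm
    rw [PySem.List.pyRange_one_eq_nil (by omega : n - 1 ≤ a)]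
    rw [pcN_of_length_le_one _ _ (by simp [hlt]; omega)]
    simp
  | succ m ih =>
    intro a r ha hm
    by_cases hend : n - 1 ≤ a
    · rw [PySem.List.pyRange_one_eq_nil hend]
      rw [pcN_of_length_le_one _ _ (by simp [hlt]; omega)]
      simp
    · rw [PySem.List.pyRange_one_cons (by omega : a < n - 1)]
      rw [List.foldl_cons]
      rw [inner_fold nums qr n a r ha (by omega) hlen]
      rw [ih (a + 1) _ (by omega) (by omega)]
      have hat : a.toNat < (nums.take n.toNat).length := by omega
      have hdrop : (nums.take n.toNat).drop a.toNat
          = (nums.take n.toNat)[a.toNat] :: (nums.take n.toNat).drop (a.toNat + 1) :=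
        (List.getElem_cons_drop hat).symm
      have hget : PySem.List.pyGetD nums a 0 = (nums.take n.toNat)[a.toNat] := by
        rw [getD_take_eq nums n a ha (by omega) hlen,
          PySem.List.pyGetD_of_nonneg _ _ ha, List.getD_eq_getElem _ _ hat]
      have hA : (a + 1).toNat = a.toNat + 1 := by omega
      rw [hdrop, pcN, hA, hget]
      by_cases hP : qr ∣ (nums.take n.toNat)[a.toNat] <;> simp [hP] <;> push_cast <;> ring

-- B's count loop computes countP over the first n elements
lemma b_count (nums : List Int) (qr n : Int) (h0 : 0 ≤ n) (hlen : n ≤ (nums.length : Int)) :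
    (PySem.List.pyRange 0 n).foldl (fun k i =>
        if PySem.Int.mod (PySem.List.pyGetD nums i 0) qr = 0 then k + 1 else k) 0
      = (((nums.take n.toNat).countP (fun v => decide (qr ∣ v)) : Nat) : Int) := by
  simp only [PySem.Int.mod_eq_zero_iff_dvd]
  rw [foldl_ite_count]
  rw [countP_range_getD nums (fun v => decide (qr ∣ v)) n 0 le_rfl h0 hlen]
  simp

-- per query, A's pair scan equals B's closed form
lemma per_query (nums : List Int) (qr n : Int) (h2 : 2 ≤ n) (hlen : n ≤ (nums.length : Int)) :
    (PySem.List.pyRange 0 (n - 1)).foldl (fun res i =>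
        (PySem.List.pyRange (i + 1) n).foldl (fun res j =>
          let x : Int := (Int.gcd (PySem.List.pyGetD nums i 0) (PySem.List.pyGetD nums j 0) : Nat)
          if PySem.Int.mod x qr = 0 then res + 1 else res) res) 0
      = (let k : Int := (PySem.List.pyRange 0 n).foldl (fun k i =>
            if PySem.Int.mod (PySem.List.pyGetD nums i 0) qr = 0 then k + 1 else k) 0
         PySem.Int.floordiv (k * (k - 1)) 2) := by
  rw [outer_fold nums qr n hlen h2 (n - 1).toNat 0 0 le_rfl (by omega)]
  show (0 : Int) + _ = PySem.Int.floordiv _ 2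
  rw [b_count nums qr n (by omega) hlen]
  rw [choose_two_int, pcN_eq_choose]
  simp

theorem solve_spec : Claim_equal_solve := by
  intro n nums q queries _hdom hpre
  unfold Spec_solve solve solve_alt
  by_cases hn2 : n < 2
  · congr 1
    funext ans qr
    rw [if_pos hn2]
    show ans ++ [(PySem.List.pyRange 0 (n-1)).foldl _ 0] = _
    rw [PySem.List.pyRange_one_eq_nil (by omega : n - 1 ≤ 0)]
    rfl
  · rcases hpre with h | h | ⟨hlen, _⟩
    · subst h; rfl
    · omega
    · congr 1
      funext ans qr
      rw [if_neg hn2]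
      show ans ++ [_] = ans ++ [_]
      rw [per_query nums qr n (by omega) hlen]
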